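-- pv_equiv track=rewrite | github.com/jkruse27/MCXXX | MC102/lab16/lab16.py | pagsResposta
-- ===== SOURCE A (Python) =====
-- def pagsResposta(palavrasPagina, termosBusca):
-- 	v = []
-- 	for i in palavrasPagina:		#Pra cada frase em palavrasPagina, transforma ela em lista e testa para ver se tem todas as palavras pedidas
-- 		j = i.split()
-- 		marcador = 0
-- 		for k in termosBusca:
-- 			for l in j:
-- 				if k == l:
-- 					marcador += 1
-- 					break
-- 		if marcador == len(termosBusca):	#Se tiver da append 1 no vetor
-- 			v.append(1)
-- 		else:		#Se não tiver da append 0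
-- 			v.append(0)
-- 	return v
-- ===== SOURCE B (Python) =====
-- def pagsResposta(palavrasPagina, termosBusca):
--     # Inverted index: map each word to the set of page indices containing it,
--     # then intersect candidate page sets per search term; no per-page scan of terms.
--     index = {}
--     for i, page in enumerate(palavrasPagina):
--         for w in page.split():
--             index.setdefault(w, set()).add(i)
--     cand = set(range(len(palavrasPagina)))
--     for t in termosBusca:
--         cand = cand & index.get(t, set())
--     return [1 if i in cand else 0 for i in range(len(palavrasPagina))]
-- ===== Notes on version B (the rewrite author's own statement) =====
-- stated objective: alternative
-- what changed: B builds an inverted index (dict word -> set of page indices) in one pass over the pages, then computes the answer set by intersecting the candidate set (all page indices) with the index entry of each search term, and finally renders 0/1 flags from membership; A instead rescans each page's split word list once per search term with a counter.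
import Mathlib
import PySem

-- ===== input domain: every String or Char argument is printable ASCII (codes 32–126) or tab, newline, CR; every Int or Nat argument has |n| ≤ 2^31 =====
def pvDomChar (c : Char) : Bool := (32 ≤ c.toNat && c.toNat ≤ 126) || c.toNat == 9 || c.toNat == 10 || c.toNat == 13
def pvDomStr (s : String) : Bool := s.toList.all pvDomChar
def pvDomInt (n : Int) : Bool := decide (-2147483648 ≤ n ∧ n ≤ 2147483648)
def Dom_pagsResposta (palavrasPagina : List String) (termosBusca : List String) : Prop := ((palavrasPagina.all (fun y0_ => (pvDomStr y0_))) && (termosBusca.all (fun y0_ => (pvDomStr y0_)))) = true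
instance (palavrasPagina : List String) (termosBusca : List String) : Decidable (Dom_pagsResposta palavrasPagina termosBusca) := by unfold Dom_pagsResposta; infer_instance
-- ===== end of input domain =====

-- B replaces A's per-page rescan of the term list by an inverted index (word -> set of
-- page indices) intersected over the search terms; same results, a different algorithm.
-- ===== PORT A =====
-- inner 'for l in j: if k==l: marcador+=1; break' loop of A
def pvInnerA (k : String) : List String → Int → Int
  | [], m => m
  | l :: rest, m => if k == l then m + 1 else pvInnerA k rest m

def pagsResposta (palavrasPagina : List String) (termosBusca : List String) : List Int :=
  palavrasPagina.foldl (fun v i =>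
    let j := PySem.Str.split₀ i
    let marcador := termosBusca.foldl (fun m k => pvInnerA k j m) (0 : Int)
    if marcador == (termosBusca.length : Int) then v ++ [1] else v ++ [0]) []

-- ===== PORT B =====
def pagsResposta_alt (palavrasPagina : List String) (termosBusca : List String) : List Int :=
  let index : PySem.Dict String (PySem.Set Int) :=
    (PySem.List.enumerate palavrasPagina 0).foldl (fun d ip =>
      (PySem.Str.split₀ ip.2).foldl (fun d w =>
        d.modify w PySem.Set.empty (fun s => PySem.Set.add s ip.1)) d)
      PySem.Dict.empty
  let cand0 : PySem.Set Int := PySem.Set.ofList (PySem.List.pyRange 0 palavrasPagina.length 1)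
  let cand := termosBusca.foldl
    (fun c t => PySem.Set.inter c (index.getD t PySem.Set.empty)) cand0
  (PySem.List.pyRange 0 palavrasPagina.length 1).map
    (fun i => if PySem.Set.contains cand i then (1 : Int) else 0)

-- ===== PRECONDITION & SPEC =====
def Spec_pagsResposta (palavrasPagina : List String) (termosBusca : List String) (out : List Int) : Prop := out = pagsResposta_alt palavrasPagina termosBusca
instance (palavrasPagina : List String) (termosBusca : List String) (out : List Int) : Decidable (Spec_pagsResposta palavrasPagina termosBusca out) := by unfold Spec_pagsResposta; infer_instance

-- ===== CLAIM (what is proved, stated in full; the proofs are below) =====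
def Claim_equal_pagsResposta : Prop := ∀ (palavrasPagina : List String) (termosBusca : List String), Dom_pagsResposta palavrasPagina termosBusca → Spec_pagsResposta palavrasPagina termosBusca (pagsResposta palavrasPagina termosBusca)

-- ===== LEMMAS AND PROOFS =====

-- the common specification both ports are reduced to
def pvSpecMap (pp ts : List String) : List Int :=
  pp.map (fun p => if ts.all (fun k => (PySem.Str.split₀ p).contains k) then (1 : Int) else 0)

theorem pvInnerA_eq (k : String) (j : List String) (m : Int) :
    pvInnerA k j m = if j.contains k then m + 1 else m := by
  induction j with
  | nil => simp [pvInnerA]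
  | cons l rest ih =>
    simp only [pvInnerA, List.contains_cons, ih]
    by_cases h : k = l
    · simp [h]
    · have h1 : (k == l) = false := by simpa using h
      simp [h1]

theorem pvMarcador_eq (j ts : List String) (m0 : Int) :
    ts.foldl (fun m k => pvInnerA k j m) m0 = m0 + (ts.countP (fun k => j.contains k) : Int) := by
  induction ts generalizing m0 with
  | nil => simp
  | cons t rest ih =>
    rw [List.foldl_cons, pvInnerA_eq, ih]
    simp only [List.countP_cons]
    by_cases h : t ∈ j
    · simp [h]; omega
    · simp [h]

theorem pvA_eq_spec (pp ts : List String) : pagsResposta pp ts = pvSpecMap pp ts := by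
  suffices h : ∀ acc, pp.foldl (fun v i =>
      if (List.foldl (fun m k => pvInnerA k (PySem.Str.split₀ i) m) (0 : Int) ts == (ts.length : Int))
      then v ++ [1] else v ++ [0]) acc = acc ++ pvSpecMap pp ts by
    exact h []
  induction pp with
  | nil => intro acc; simp [pvSpecMap]
  | cons p rest ih =>
    intro acc
    rw [List.foldl_cons, ih, pvMarcador_eq (PySem.Str.split₀ p) ts 0]
    have hiff : ((0 : Int) + (ts.countP (fun k => (PySem.Str.split₀ p).contains k) : Int)
          = (ts.length : Int))
        ↔ (ts.all (fun k => (PySem.Str.split₀ p).contains k) = true) := by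
      rw [zero_add, Int.natCast_inj, List.countP_eq_length, List.all_eq_true]
    by_cases hc : ts.all (fun k => (PySem.Str.split₀ p).contains k) = true
    · rw [if_pos (beq_iff_eq.mpr (hiff.mpr hc))]
      show acc ++ [(1 : Int)] ++ pvSpecMap rest ts = acc ++ pvSpecMap (p :: rest) ts
      rw [show pvSpecMap (p :: rest) ts
            = (if ts.all (fun k => (PySem.Str.split₀ p).contains k) then (1 : Int) else 0)
              :: pvSpecMap rest ts from rfl, if_pos hc]
      simp [pvSpecMap]
    · rw [if_neg (fun h => hc (hiff.mp (beq_iff_eq.mp h)))]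
      show acc ++ [(0 : Int)] ++ pvSpecMap rest ts = acc ++ pvSpecMap (p :: rest) ts
      rw [show pvSpecMap (p :: rest) ts
            = (if ts.all (fun k => (PySem.Str.split₀ p).contains k) then (1 : Int) else 0)
              :: pvSpecMap rest ts from rfl, if_neg hc]
      simp [pvSpecMap]

-- membership in one page's contribution to the index
theorem pvInner_mem (ws : List String) (i x : Int) (t : String)
    (d : PySem.Dict String (PySem.Set Int)) :
    (x ∈ (ws.foldl (fun d w => d.modify w PySem.Set.empty (fun s => PySem.Set.add s i)) d).getD t
        PySem.Set.empty)
      ↔ (x ∈ d.getD t PySem.Set.empty ∨ (x = i ∧ t ∈ ws)) := by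
  induction ws generalizing d with
  | nil => simp
  | cons w rest ih =>
    rw [List.foldl_cons, ih]
    rw [PySem.Dict.getD_modify]
    by_cases hw : t = w
    · subst hw
      simp [PySem.Set.mem_add]
      tauto
    · simp [hw]

-- membership in the full inverted index
theorem pvIndex_mem (pp : List String) (s x : Int) (t : String)
    (d : PySem.Dict String (PySem.Set Int)) :
    (x ∈ ((PySem.List.enumerate pp s).foldl (fun d ip =>
        (PySem.Str.split₀ ip.2).foldl (fun d w =>
          d.modify w PySem.Set.empty (fun s' => PySem.Set.add s' ip.1)) d) d).getD t
        PySem.Set.empty)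
      ↔ (x ∈ d.getD t PySem.Set.empty
          ∨ ∃ k : Nat, ∃ h : k < pp.length, x = s + k ∧ t ∈ PySem.Str.split₀ pp[k]) := by
  induction pp generalizing s d with
  | nil => simp [PySem.List.enumerate_nil]
  | cons p rest ih =>
    rw [PySem.List.enumerate_cons, List.foldl_cons, ih, pvInner_mem]
    constructor
    · rintro (( h | ⟨hx, ht⟩ ) | ⟨k, hk, hx, ht⟩)
      · exact Or.inl h
      · exact Or.inr ⟨0, by simp, by simpa using hx, by simpa using ht⟩
      · exact Or.inr ⟨k + 1, by simpa using hk, by push_cast at hx ⊢; omega, by simpa using ht⟩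
    · rintro ( h | ⟨k, hk, hx, ht⟩ )
      · exact Or.inl (Or.inl h)
      · cases k with
        | zero => exact Or.inl (Or.inr ⟨by simpa using hx, by simpa using ht⟩)
        | succ k =>
          exact Or.inr ⟨k, by simpa using hk, by push_cast at hx ⊢; omega, by simpa using ht⟩

-- membership after intersecting over the search terms
theorem pvCand_mem (ts : List String) (g : String → PySem.Set Int) (c0 : PySem.Set Int) (x : Int) :
    (x ∈ ts.foldl (fun c t => PySem.Set.inter c (g t)) c0)
      ↔ (x ∈ c0 ∧ ∀ t ∈ ts, x ∈ g t) := by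
  induction ts generalizing c0 with
  | nil => simp
  | cons t rest ih =>
    rw [List.foldl_cons, ih]
    constructor
    · rintro ⟨hc, hrest⟩
      rw [PySem.Set.mem_inter] at hc
      exact ⟨hc.1, fun u hu => by
        rcases List.mem_cons.mp hu with h | h
        · exact h ▸ hc.2
        · exact hrest u h⟩
    · rintro ⟨hc0, hall⟩
      exact ⟨(PySem.Set.mem_inter _ _ _).mpr ⟨hc0, hall t (List.mem_cons_self ..)⟩,
        fun u hu => hall u (List.mem_cons_of_mem _ hu)⟩

theorem pvB_eq_spec (pp ts : List String) : pagsResposta_alt pp ts = pvSpecMap pp ts := by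
  unfold pagsResposta_alt pvSpecMap
  apply List.ext_getElem
  · simp [PySem.List.length_pyRange_one]
  · intro k hk hk'
    simp only [List.getElem_map]
    rw [PySem.List.getElem_pyRange_one]
    have hknat : k < pp.length := by simpa using hk'
    have hmem : ((0 : Int) + k ∈ ts.foldl
        (fun c t => PySem.Set.inter c
          (((PySem.List.enumerate pp 0).foldl (fun d ip =>
              (PySem.Str.split₀ ip.2).foldl (fun d w =>
                d.modify w PySem.Set.empty (fun s => PySem.Set.add s ip.1)) d)
            PySem.Dict.empty).getD t PySem.Set.empty))
        (PySem.Set.ofList (PySem.List.pyRange 0 pp.length 1)))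
        ↔ (ts.all (fun t => (PySem.Str.split₀ pp[k]).contains t) = true) := by
      rw [pvCand_mem]
      constructor
      · rintro ⟨-, h⟩
        rw [List.all_eq_true]
        intro t ht
        have := (pvIndex_mem pp 0 (0 + k) t PySem.Dict.empty).mp (h t ht)
        rcases this with h0 | ⟨j, hj, hx, htj⟩
        · simp at h0
        · have : j = k := by omega
          subst this
          simpa using htj
      · intro hall
        refine ⟨?_, ?_⟩
        · rw [PySem.Set.mem_ofList, PySem.List.mem_pyRange_one]
          omega
        · intro t ht
          rw [pvIndex_mem]
          exact Or.inr ⟨k, hknat, rfl, by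
            rw [List.all_eq_true] at hall
            simpa using hall t ht⟩
    by_cases hc : ts.all (fun t => (PySem.Str.split₀ pp[k]).contains t) = true
    · rw [if_pos hc]
      rw [if_pos (by exact (PySem.Set.contains_iff _ _).mpr (hmem.mpr hc))]
    · rw [if_neg hc]
      rw [if_neg (by
        intro hcon
        exact hc (hmem.mp ((PySem.Set.contains_iff _ _).mp hcon)))]

-- ===== VERDICT (by name: the statement is the Claim_ definition above) =====
theorem pagsResposta_spec : Claim_equal_pagsResposta := by
  intro pp ts _
  unfold Spec_pagsResposta
  rw [pvA_eq_spec, pvB_eq_spec]
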